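-- pv_equiv track=rewrite | github.com/wulfsagedev/civaccount | enrich-documents-sources.py | generate_open_data_links_block
-- ===== SOURCE A (Python) =====
-- def escape_ts(s):
--     return s.replace("\\", "\\\\").replace('"', '\\"').replace("\n", " ")
--
-- def generate_open_data_links_block(name, urls):
--     """Generate open_data_links array grouped by theme."""
--     themes = []
--
--     # Finance & spending
--     finance_links = []
--     if "budget_url" in urls:
--         finance_links.append({
--             "label": "Budget overview",
--             "url": urls["budget_url"],
--             "description": "Annual budget documents and breakdown",
--         })
--     if "accounts_url" in urls:
--         finance_links.append({
--             "label": "Statement of Accounts",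
--             "url": urls["accounts_url"],
--             "description": "Audited financial statements",
--         })
--     if "transparency_url" in urls:
--         finance_links.append({
--             "label": "Spending data",
--             "url": urls["transparency_url"],
--             "description": "Spending over £500 and contract payments",
--         })
--     if finance_links:
--         themes.append(("Finance & spending", finance_links))
--
--     # Council & democracy
--     democracy_links = []
--     if "councillors_url" in urls:
--         democracy_links.append({
--             "label": "Your councillors",
--             "url": urls["councillors_url"],
--             "description": "Find and contact your local councillors",
--         })
--     if "council_tax_url" in urls:
--         democracy_links.append({
--             "label": "Council tax",
--             "url": urls["council_tax_url"],
--             "description": "Council tax rates, bands and payments",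
--         })
--     if democracy_links:
--         themes.append(("Council & democracy", democracy_links))
--
--     # Data sources (standard GOV.UK sources that apply to all councils)
--     if "website" in urls:
--         themes.append(("Official website", [
--             {
--                 "label": f"{name} council website",
--                 "url": urls["website"],
--                 "description": "Main council website with services and information",
--             },
--         ]))
--
--     if not themes:
--         return None
--
--     lines = ["      open_data_links: ["]
--     for theme_name, links in themes:
--         lines.append(f'        {{')
--         lines.append(f'          theme: "{escape_ts(theme_name)}",')
--         lines.append(f'          links: [')
--         for link in links:
--             label = escape_ts(link["label"])
--             url = escape_ts(link["url"])
--             desc = escape_ts(link["description"])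
--             lines.append(f'            {{ label: "{label}", url: "{url}", description: "{desc}" }},')
--         lines.append(f'          ],')
--         lines.append(f'        }},')
--     lines.append("      ],")
--     return "\n".join(lines)
-- ===== SOURCE B (Python) =====
-- # B: table-driven construction (theme spec table + comprehension filter) and
-- # direct string concatenation per theme block instead of a flat lines list + join.
--
-- def escape_ts(s):
--     return "".join("\\\\" if c == "\\" else '\\"' if c == '"' else " " if c == "\n" else c for c in s)
--
-- def generate_open_data_links_block(name, urls):
--     """Generate open_data_links array grouped by theme."""
--     spec = [
--         ("Finance & spending", [
--             ("budget_url", "Budget overview", "Annual budget documents and breakdown"),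
--             ("accounts_url", "Statement of Accounts", "Audited financial statements"),
--             ("transparency_url", "Spending data", "Spending over £500 and contract payments"),
--         ]),
--         ("Council & democracy", [
--             ("councillors_url", "Your councillors", "Find and contact your local councillors"),
--             ("council_tax_url", "Council tax", "Council tax rates, bands and payments"),
--         ]),
--         ("Official website", [
--             ("website", f"{name} council website", "Main council website with services and information"),
--         ]),
--     ]
--     themes = []
--     for theme_name, entries in spec:
--         links = [(label, urls[key], desc) for key, label, desc in entries if key in urls]
--         if links:
--             themes.append((theme_name, links))
--     if not themes:
--         return None
--
--     def link_line(link):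
--         label, url, desc = link
--         return f'            {{ label: "{escape_ts(label)}", url: "{escape_ts(url)}", description: "{escape_ts(desc)}" }},\n'
--
--     def theme_block(theme):
--         theme_name, links = theme
--         return ('        {\n'
--                 f'          theme: "{escape_ts(theme_name)}",\n'
--                 '          links: [\n'
--                 + "".join(map(link_line, links))
--                 + '          ],\n'
--                 '        },\n')
--
--     return "      open_data_links: [\n" + "".join(map(theme_block, themes)) + "      ],"
-- ===== Notes on version B (the rewrite author's own statement) =====
-- stated objective: simpler
-- what changed: Replaces the hand-unrolled per-theme if/append blocks with a declarative spec table filtered by key presence, builds the output by concatenating per-theme block strings instead of accumulating a flat lines list joined by newline, and escapes with a single per-character pass instead of three sequential str.replace passes.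
import Mathlib
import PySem

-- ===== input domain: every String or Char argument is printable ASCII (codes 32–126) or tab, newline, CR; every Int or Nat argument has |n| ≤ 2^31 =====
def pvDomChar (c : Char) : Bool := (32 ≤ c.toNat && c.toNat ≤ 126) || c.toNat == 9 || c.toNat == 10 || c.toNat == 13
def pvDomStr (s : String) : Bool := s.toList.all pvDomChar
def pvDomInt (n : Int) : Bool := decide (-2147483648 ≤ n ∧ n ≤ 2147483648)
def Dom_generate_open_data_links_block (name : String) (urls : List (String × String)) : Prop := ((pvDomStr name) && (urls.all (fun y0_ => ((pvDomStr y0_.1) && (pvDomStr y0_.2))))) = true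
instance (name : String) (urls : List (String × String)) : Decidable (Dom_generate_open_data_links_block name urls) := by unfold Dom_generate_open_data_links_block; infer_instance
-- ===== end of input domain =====

-- B replaces the hand-unrolled per-theme if/append blocks with a declarative spec table,
-- builds the output by concatenating per-theme block strings instead of a flat lines
-- list joined by "\n", and escapes with one per-character pass instead of three
-- sequential replace passes (objective: simpler).
-- Link dicts with the fixed keys label/url/description are ported as triples (exact:
-- the Python only ever builds and reads those three keys).

-- ===== PORT A =====
def escape_ts (s : String) : String :=
  PySem.Str.replace (PySem.Str.replace (PySem.Str.replace s "\\" "\\\\") "\"" "\\\"") "\n" " "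

-- one line of A's inner loop (label/url/description read back from the link)
def odlLinkLine (lk : String × String × String) : String :=
  "            { label: \"" ++ escape_ts lk.1 ++ "\", url: \"" ++ escape_ts lk.2.1 ++
  "\", description: \"" ++ escape_ts lk.2.2 ++ "\" },"

-- body of A's outer loop over themes (the three header appends, the inner loop, the two closers)
def odlThemeStep (lines : List String) (tl : String × List (String × String × String)) : List String :=
  (tl.2.foldl (fun ls lk => ls ++ [odlLinkLine lk])
    (lines ++ ["        {", "          theme: \"" ++ escape_ts tl.1 ++ "\",", "          links: ["]))
  ++ ["          ],", "        },"]

def generate_open_data_links_block (name : String) (urls : List (String × String)) : Option String :=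
  let d := PySem.Dict.mk urls
  let finance_links : List (String × String × String) := []
  let finance_links := if d.contains "budget_url" then
    finance_links ++ [("Budget overview", (d.get? "budget_url").getD "", "Annual budget documents and breakdown")] else finance_links
  let finance_links := if d.contains "accounts_url" then
    finance_links ++ [("Statement of Accounts", (d.get? "accounts_url").getD "", "Audited financial statements")] else finance_links
  let finance_links := if d.contains "transparency_url" then
    finance_links ++ [("Spending data", (d.get? "transparency_url").getD "", "Spending over £500 and contract payments")] else finance_links
  let themes : List (String × List (String × String × String)) := []
  let themes := if finance_links.isEmpty then themes else themes ++ [("Finance & spending", finance_links)]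
  let democracy_links : List (String × String × String) := []
  let democracy_links := if d.contains "councillors_url" then
    democracy_links ++ [("Your councillors", (d.get? "councillors_url").getD "", "Find and contact your local councillors")] else democracy_links
  let democracy_links := if d.contains "council_tax_url" then
    democracy_links ++ [("Council tax", (d.get? "council_tax_url").getD "", "Council tax rates, bands and payments")] else democracy_links
  let themes := if democracy_links.isEmpty then themes else themes ++ [("Council & democracy", democracy_links)]
  let themes := if d.contains "website" then
    themes ++ [("Official website", [(name ++ " council website", (d.get? "website").getD "", "Main council website with services and information")])] else themes
  if themes.isEmpty then none
  else some (PySem.Str.join "\n" ((themes.foldl odlThemeStep ["      open_data_links: ["]) ++ ["      ],"]))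

-- ===== PORT B =====
def escape_ts_alt (s : String) : String :=
  String.ofList (s.toList.flatMap (fun c =>
    if c == '\\' then ['\\', '\\'] else if c == '"' then ['\\', '"'] else if c == '\n' then [' '] else [c]))

def odlSpec (name : String) : List (String × List (String × String × String)) :=
  [("Finance & spending",
     [("budget_url", "Budget overview", "Annual budget documents and breakdown"),
      ("accounts_url", "Statement of Accounts", "Audited financial statements"),
      ("transparency_url", "Spending data", "Spending over £500 and contract payments")]),
   ("Council & democracy",
     [("councillors_url", "Your councillors", "Find and contact your local councillors"),
      ("council_tax_url", "Council tax", "Council tax rates, bands and payments")]),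
   ("Official website",
     [("website", name ++ " council website", "Main council website with services and information")])]

def odlLinkLineAlt (lk : String × String × String) : String :=
  "            { label: \"" ++ escape_ts_alt lk.1 ++ "\", url: \"" ++ escape_ts_alt lk.2.1 ++
  "\", description: \"" ++ escape_ts_alt lk.2.2 ++ "\" },\n"

def odlThemeBlock (tl : String × List (String × String × String)) : String :=
  "        {\n          theme: \"" ++ escape_ts_alt tl.1 ++ "\",\n          links: [\n"
  ++ PySem.Str.join "" (tl.2.map odlLinkLineAlt) ++ "          ],\n        },\n"

-- body of B's loop over the spec table
def odlThemeStepAlt (d : PySem.Dict String String)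
    (acc : List (String × List (String × String × String)))
    (te : String × List (String × String × String)) :
    List (String × List (String × String × String)) :=
  let links := te.2.filterMap (fun e => if d.contains e.1 then some (e.2.1, (d.get? e.1).getD "", e.2.2) else none)
  if links.isEmpty then acc else acc ++ [(te.1, links)]

def generate_open_data_links_block_alt (name : String) (urls : List (String × String)) : Option String :=
  let d := PySem.Dict.mk urls
  let themes := (odlSpec name).foldl (odlThemeStepAlt d) []
  if themes.isEmpty then none
  else some ("      open_data_links: [\n" ++ PySem.Str.join "" (themes.map odlThemeBlock) ++ "      ],")

-- ===== PRECONDITION & SPEC =====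
def Spec_generate_open_data_links_block (name : String) (urls : List (String × String)) (out : Option String) : Prop := out = generate_open_data_links_block_alt name urls
instance (name : String) (urls : List (String × String)) (out : Option String) : Decidable (Spec_generate_open_data_links_block name urls out) := by unfold Spec_generate_open_data_links_block; infer_instance

-- ===== CLAIM (what is proved, stated in full; the proofs are below) =====
def Claim_equal_generate_open_data_links_block : Prop := ∀ (name : String) (urls : List (String × String)), Dom_generate_open_data_links_block name urls → Spec_generate_open_data_links_block name urls (generate_open_data_links_block name urls)

-- ===== LEMMAS AND PROOFS =====

-- single-character replace is a per-character flatMap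
theorem replace_go_single (o : Char) (new : List Char) :
    ∀ (fuel : Nat) (l acc : List Char), l.length ≤ fuel →
      PySem.Chars.replace.go [o] new fuel l acc
        = acc.reverse ++ l.flatMap (fun c => if c == o then new else [c]) := by
  intro fuel
  induction fuel with
  | zero =>
    intro l acc h
    cases l with
    | nil => simp [PySem.Chars.replace.go]
    | cons c t => simp at h
  | succ n ih =>
    intro l acc h
    cases l with
    | nil => simp [PySem.Chars.replace.go]
    | cons c t =>
      by_cases hc : c = o
      · subst hc
        rw [PySem.Chars.replace.go]
        simp [List.isPrefixOf, ih t _ (by simpa using h)]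
      · rw [PySem.Chars.replace.go]
        rw [ih t _ (by simpa using h)]
        simp [List.isPrefixOf, Ne.symm hc, hc]

theorem replace_single (cs : List Char) (o : Char) (new : List Char) :
    PySem.Chars.replace cs [o] new = cs.flatMap (fun c => if c == o then new else [c]) := by
  simp [PySem.Chars.replace, replace_go_single o new cs.length cs [] le_rfl]

theorem escape_eq (s : String) : escape_ts_alt s = escape_ts s := by
  rw [← String.toList_inj]
  simp only [escape_ts, escape_ts_alt, PySem.Str.replace, String.toList_ofList]
  simp only [show ("\\" : String).toList = ['\\'] from rfl,
             show ("\\\\" : String).toList = ['\\', '\\'] from rfl,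
             show ("\"" : String).toList = ['"'] from rfl,
             show ("\\\"" : String).toList = ['\\', '"'] from rfl,
             show ("\n" : String).toList = ['\n'] from rfl,
             show (" " : String).toList = [' '] from rfl]
  rw [replace_single, replace_single, replace_single, List.flatMap_assoc, List.flatMap_assoc]
  apply List.flatMap_congr
  intro c _
  by_cases h1 : c = '\\'
  · simp [h1]
  · by_cases h2 : c = '"'
    · simp [h2]
    · by_cases h3 : c = '\n'
      · simp [h3]
      · simp [h1, h2, h3]

-- the lines A's outer-loop body appends for one theme
def odlThemeLines (tl : String × List (String × String × String)) : List String :=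
  ["        {", "          theme: \"" ++ escape_ts tl.1 ++ "\",", "          links: ["]
  ++ tl.2.map odlLinkLine ++ ["          ],", "        },"]

theorem flatten_map_singleton {α β : Type} (l : List α) (f : α → β) :
    (l.map (fun x => [f x])).flatten = l.map f := by
  induction l with
  | nil => rfl
  | cons a t ih => simp [ih]

theorem odlThemeStep_eq (lines : List String) (tl : String × List (String × String × String)) :
    odlThemeStep lines tl = lines ++ odlThemeLines tl := by
  rw [odlThemeStep, PySem.List.foldl_append_eq_flatMap]
  simp [odlThemeLines, List.flatMap, flatten_map_singleton]

theorem odlFoldl_eq (themes : List (String × List (String × String × String))) (lines : List String) :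
    themes.foldl odlThemeStep lines = lines ++ themes.flatMap odlThemeLines := by
  have : odlThemeStep = fun ls tl => ls ++ odlThemeLines tl := by
    funext ls tl; exact odlThemeStep_eq ls tl
  rw [this, PySem.List.foldl_append_eq_flatMap]

theorem join_empty_sep (ls : List (List Char)) : PySem.Chars.join [] ls = ls.flatten := by
  induction ls with
  | nil => simp [PySem.Chars.join_nil]
  | cons a t ih =>
    cases t with
    | nil => simp [PySem.Chars.join_singleton]
    | cons b r => rw [PySem.Chars.join_cons_cons]; simp [ih]

theorem join_snoc (ls : List (List Char)) (z : List Char) :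
    PySem.Chars.join ['\n'] (ls ++ [z]) = (ls.map (· ++ ['\n'])).flatten ++ z := by
  induction ls with
  | nil => simp [PySem.Chars.join_singleton]
  | cons a t ih =>
    have h : (a :: t) ++ [z] = a :: (t ++ [z]) := rfl
    rw [h]
    cases hz : t ++ [z] with
    | nil => simp at hz
    | cons b r =>
      rw [PySem.Chars.join_cons_cons, ← hz, ih]
      simp

theorem link_toList (lk : String × String × String) :
    (odlLinkLine lk).toList ++ ['\n'] = (odlLinkLineAlt lk).toList := by
  simp only [odlLinkLine, odlLinkLineAlt, escape_eq, String.toList_append]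
  simp [show ("\" },\n" : String).toList = ("\" },").toList ++ ['\n'] from rfl]

set_option maxHeartbeats 1000000 in
theorem block_toList (tl : String × List (String × String × String)) :
    (((odlThemeLines tl).map String.toList).map (· ++ ['\n'])).flatten = (odlThemeBlock tl).toList := by
  have hinner : (tl.2.map (fun lk => (odlLinkLine lk).toList ++ ['\n']))
      = tl.2.map (fun lk => (odlLinkLineAlt lk).toList) :=
    List.map_congr_left (fun lk _ => link_toList lk)
  simp only [odlThemeLines, odlThemeBlock, escape_eq, PySem.Str.join, String.toList_ofList,
    List.map_append, List.flatten_append, List.map_map, List.map_cons, List.map_nil,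
    List.flatten_cons, List.flatten_nil, String.toList_append,
    show ("" : String).toList = [] from rfl, join_empty_sep, Function.comp_def, hinner]
  simp [show ("        {\n          theme: \"" : String).toList
          = ("        {").toList ++ ['\n'] ++ ("          theme: \"").toList from rfl,
        show ("\",\n          links: [\n" : String).toList
          = ("\",").toList ++ ['\n'] ++ ("          links: [").toList ++ ['\n'] from rfl,
        show ("          ],\n        },\n" : String).toList
          = ("          ],").toList ++ ['\n'] ++ ("        },").toList ++ ['\n'] from rfl]

theorem format_eq (themes : List (String × List (String × String × String))) :
    PySem.Str.join "\n" ((themes.foldl odlThemeStep ["      open_data_links: ["]) ++ ["      ],"])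
      = "      open_data_links: [\n" ++ PySem.Str.join "" (themes.map odlThemeBlock) ++ "      ]," := by
  rw [← String.toList_inj, odlFoldl_eq]
  simp only [PySem.Str.join, String.toList_ofList, String.toList_append]
  rw [show ((["      open_data_links: ["] ++ themes.flatMap odlThemeLines ++ ["      ],"]).map String.toList)
        = ((["      open_data_links: ["] ++ themes.flatMap odlThemeLines).map String.toList) ++ [("      ],").toList] by simp]
  rw [show ("\n" : String).toList = ['\n'] from rfl, join_snoc,
     show ("" : String).toList = [] from rfl, join_empty_sep]
  simp only [List.map_append, List.map_cons, List.map_nil, List.flatten_append, List.flatten_cons,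
    List.flatten_nil]
  have hbody : (((themes.flatMap odlThemeLines).map String.toList).map (· ++ ['\n'])).flatten
      = ((themes.map odlThemeBlock).map String.toList).flatten := by
    induction themes with
    | nil => simp
    | cons t r ih =>
      simp only [List.flatMap_cons, List.map_append, List.flatten_append, List.map_cons,
        List.flatten_cons, ih, block_toList]
  rw [hbody]
  simp [show ("      open_data_links: [\n" : String).toList
          = ("      open_data_links: [").toList ++ ['\n'] from rfl]

-- ===== VERDICT (by name: the statement is the Claim_ definition above) =====
theorem themes_eq (name : String) (d : PySem.Dict String String) :
    (odlSpec name).foldl (odlThemeStepAlt d) []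
    = (let finance_links : List (String × String × String) := []
       let finance_links := if d.contains "budget_url" then
         finance_links ++ [("Budget overview", (d.get? "budget_url").getD "", "Annual budget documents and breakdown")] else finance_links
       let finance_links := if d.contains "accounts_url" then
         finance_links ++ [("Statement of Accounts", (d.get? "accounts_url").getD "", "Audited financial statements")] else finance_links
       let finance_links := if d.contains "transparency_url" then
         finance_links ++ [("Spending data", (d.get? "transparency_url").getD "", "Spending over £500 and contract payments")] else finance_links
       let themes : List (String × List (String × String × String)) := []
       let themes := if finance_links.isEmpty then themes else themes ++ [("Finance & spending", finance_links)]
       let democracy_links : List (String × String × String) := []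
       let democracy_links := if d.contains "councillors_url" then
         democracy_links ++ [("Your councillors", (d.get? "councillors_url").getD "", "Find and contact your local councillors")] else democracy_links
       let democracy_links := if d.contains "council_tax_url" then
         democracy_links ++ [("Council tax", (d.get? "council_tax_url").getD "", "Council tax rates, bands and payments")] else democracy_links
       let themes := if democracy_links.isEmpty then themes else themes ++ [("Council & democracy", democracy_links)]
       let themes := if d.contains "website" then
         themes ++ [("Official website", [(name ++ " council website", (d.get? "website").getD "", "Main council website with services and information")])] else themes
       themes) := by
  by_cases h1 : d.contains "budget_url" = true <;>
  by_cases h2 : d.contains "accounts_url" = true <;>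
  by_cases h3 : d.contains "transparency_url" = true <;>
  by_cases h4 : d.contains "councillors_url" = true <;>
  by_cases h5 : d.contains "council_tax_url" = true <;>
  by_cases h6 : d.contains "website" = true <;>
  simp [odlSpec, odlThemeStepAlt, h1, h2, h3, h4, h5, h6]

theorem tail_eq (themes : List (String × List (String × String × String))) :
    (if themes.isEmpty then none
     else some (PySem.Str.join "\n" ((themes.foldl odlThemeStep ["      open_data_links: ["]) ++ ["      ],"])))
    = (if themes.isEmpty then none
       else some ("      open_data_links: [\n" ++ PySem.Str.join "" (themes.map odlThemeBlock) ++ "      ],")) := by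
  by_cases h : themes.isEmpty <;> simp [h, format_eq]

set_option maxHeartbeats 4000000 in
theorem generate_open_data_links_block_spec : Claim_equal_generate_open_data_links_block := by
  intro name urls _
  unfold Spec_generate_open_data_links_block
  simp only [generate_open_data_links_block, generate_open_data_links_block_alt]
  rw [themes_eq]
  exact tail_eq _
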